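-- pv_equiv track=rewrite | github.com/gyorilab/indra_bert | indra_stmt_agents_ner_model/preprocess.py | reassign_member_indices
-- ===== SOURCE A (Python) =====
-- def reassign_member_indices(predicted_tags):
--     reassigned = []
--     current_index = -1
--     for tag in predicted_tags:
--         if tag == "B-members":
--             current_index += 1
--             reassigned.append(f"B-members.{current_index}")
--         elif tag == "I-members":
--             if current_index == -1:
--                 reassigned.append("I-members.0")
--             else:
--                 reassigned.append(f"I-members.{current_index}")
--         else:
--             reassigned.append(tag)
--     return reassigned
-- ===== SOURCE B (Python) =====
-- def reassign_member_indices(predicted_tags):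
--     # Two-pass decomposition: prefix-count table of "B-members" seen so far, then format each tag.
--     counts = []
--     c = 0
--     for tag in predicted_tags:
--         if tag == "B-members":
--             c += 1
--         counts.append(c)
--     out = []
--     for tag, c in zip(predicted_tags, counts):
--         if tag == "B-members":
--             out.append(f"B-members.{c - 1}")
--         elif tag == "I-members":
--             out.append(f"I-members.{max(c - 1, 0)}")
--         else:
--             out.append(tag)
--     return out
-- ===== Notes on version B (the rewrite author's own statement) =====
-- stated objective: alternative
-- what changed: Replaces the single loop with interleaved running-index state by a two-pass decomposition: first a prefix-count table of B-members occurrences, then an independent formatting map over tag/count pairs.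
import Mathlib
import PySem

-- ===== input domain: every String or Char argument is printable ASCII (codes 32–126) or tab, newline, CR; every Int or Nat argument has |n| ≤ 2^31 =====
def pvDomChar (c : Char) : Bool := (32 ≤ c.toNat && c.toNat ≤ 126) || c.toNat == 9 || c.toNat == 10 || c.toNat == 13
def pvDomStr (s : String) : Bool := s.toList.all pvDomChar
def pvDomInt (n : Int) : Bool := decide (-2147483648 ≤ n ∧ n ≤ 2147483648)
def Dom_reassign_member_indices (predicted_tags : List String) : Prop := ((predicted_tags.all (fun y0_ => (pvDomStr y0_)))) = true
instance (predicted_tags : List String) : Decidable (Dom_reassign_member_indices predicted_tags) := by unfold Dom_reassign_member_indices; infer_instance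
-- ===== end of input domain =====

-- B replaces A's single running-state loop by a prefix-count table followed by a formatting map (alternative decomposition, same cost).

-- ===== PORT A =====
def reassign_member_indices (predicted_tags : List String) : List String :=
  (predicted_tags.foldl (fun (st : List String × Int) tag =>
    if tag = "B-members" then
      (st.1 ++ ["B-members." ++ PySem.Int.toStr (st.2 + 1)], st.2 + 1)
    else if tag = "I-members" then
      if st.2 = -1 then (st.1 ++ ["I-members.0"], st.2)
      else (st.1 ++ ["I-members." ++ PySem.Int.toStr st.2], st.2)
    else (st.1 ++ [tag], st.2)) ([], -1)).1

-- ===== PORT B =====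
-- first pass: running count of "B-members" tags seen so far (inclusive)
def pvPrefixCounts : List String → Int → List Int
  | [], _ => []
  | tag :: rest, c =>
    let c' := if tag = "B-members" then c + 1 else c
    c' :: pvPrefixCounts rest c'

-- second pass: format one tag given its prefix count
def pvFmt (p : String × Int) : String :=
  if p.1 = "B-members" then "B-members." ++ PySem.Int.toStr (p.2 - 1)
  else if p.1 = "I-members" then "I-members." ++ PySem.Int.toStr (max (p.2 - 1) 0)
  else p.1

def reassign_member_indices_alt (predicted_tags : List String) : List String :=
  (predicted_tags.zip (pvPrefixCounts predicted_tags 0)).map pvFmt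

-- ===== PRECONDITION & SPEC =====
def Spec_reassign_member_indices (predicted_tags : List String) (out : List String) : Prop := out = reassign_member_indices_alt predicted_tags
instance (predicted_tags : List String) (out : List String) : Decidable (Spec_reassign_member_indices predicted_tags out) := by unfold Spec_reassign_member_indices; infer_instance

-- ===== CLAIM (what is proved, stated in full; the proofs are below) =====
def Claim_equal_reassign_member_indices : Prop := ∀ (predicted_tags : List String), Dom_reassign_member_indices predicted_tags → Spec_reassign_member_indices predicted_tags (reassign_member_indices predicted_tags)

-- ===== LEMMAS AND PROOFS =====

theorem reassign_loop_eq (l : List String) (c : Int) (hc : 0 ≤ c) (acc : List String) :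
    (l.foldl (fun (st : List String × Int) tag =>
      if tag = "B-members" then
        (st.1 ++ ["B-members." ++ PySem.Int.toStr (st.2 + 1)], st.2 + 1)
      else if tag = "I-members" then
        if st.2 = -1 then (st.1 ++ ["I-members.0"], st.2)
        else (st.1 ++ ["I-members." ++ PySem.Int.toStr st.2], st.2)
      else (st.1 ++ [tag], st.2)) (acc, c - 1)).1
    = acc ++ (l.zip (pvPrefixCounts l c)).map pvFmt := by
  induction l generalizing c acc with
  | nil => simp [pvPrefixCounts]
  | cons tag rest ih =>
    by_cases hb : tag = "B-members"
    · subst hb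
      simp only [List.foldl_cons, pvPrefixCounts, List.zip_cons_cons, List.map_cons,
        String.reduceEq, reduceIte, if_true]
      rw [show (c : Int) - 1 + 1 = (c + 1) - 1 by ring,
        ih (c + 1) (by omega) (acc ++ ["B-members." ++ PySem.Int.toStr (c + 1 - 1)])]
      simp [pvFmt]
    · by_cases hi : tag = "I-members"
      · subst hi
        by_cases h0 : c = 0
        · subst h0
          simp only [List.foldl_cons, pvPrefixCounts, List.zip_cons_cons, List.map_cons,
            String.reduceEq, if_true, if_false]
          norm_num
          have h := ih 0 le_rfl (acc ++ ["I-members.0"])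
          norm_num at h
          rw [h]
          have hf : pvFmt ("I-members", (0:Int)) = "I-members.0" := by decide
          simp [hf]
        · have hne : (c : Int) - 1 ≠ -1 := by omega
          simp only [List.foldl_cons, pvPrefixCounts, List.zip_cons_cons, List.map_cons,
            String.reduceEq, if_true, if_false, if_neg hne]
          rw [ih c hc (acc ++ ["I-members." ++ PySem.Int.toStr (c - 1)])]
          have hm : max (c - 1) 0 = c - 1 := by omega
          have hf : pvFmt ("I-members", c) = "I-members." ++ PySem.Int.toStr (c - 1) := by
            simp only [pvFmt, String.reduceEq, reduceIte, hm]
          simp [hf]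
      · simp only [List.foldl_cons, pvPrefixCounts, List.zip_cons_cons, List.map_cons,
          if_neg hb, if_neg hi]
        rw [ih c hc (acc ++ [tag])]
        simp [pvFmt, hb, hi]

-- ===== VERDICT (by name: the statement is the Claim_ definition above) =====
theorem reassign_member_indices_spec : Claim_equal_reassign_member_indices := by
  intro tags _
  unfold Spec_reassign_member_indices reassign_member_indices reassign_member_indices_alt
  have := reassign_loop_eq tags 0 le_rfl []
  simpa using this
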